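-- pv_equiv track=rewrite | github.com/Om-Thapa/Programming | Python/AI_ML_Lab/Embeddings.py | create_index
-- ===== SOURCE A (Python) =====
-- def create_index(sentences):
--     """Create a dictionary mapping each unique word to an index (1-based)."""
--     vocab = set()
--     for sent in sentences:
--         for token in sent.split():
--             token = "".join(ch for ch in token if ch.isalnum())
--             if token:
--                 vocab.add(token.lower())
--     return {word: i + 1 for i, word in enumerate(sorted(vocab))}
-- ===== SOURCE B (Python) =====
-- def create_index(sentences):
--     """Create a dictionary mapping each unique word to an index (1-based)."""
--     # Online insertion: maintain a strictly sorted, duplicate-free vocabulary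
--     # list while scanning, locating each word's slot by binary search;
--     # no set is built and no sort call is made.
--     vocab = []
--     for sent in sentences:
--         for token in sent.split():
--             token = "".join(ch for ch in token if ch.isalnum())
--             if token:
--                 w = token.lower()
--                 lo, hi = 0, len(vocab)
--                 while lo < hi:
--                     mid = (lo + hi) // 2
--                     if vocab[mid] < w:
--                         lo = mid + 1
--                     else:
--                         hi = mid
--                 if lo == len(vocab) or vocab[lo] != w:
--                     vocab.insert(lo, w)
--     return {w: i + 1 for i, w in enumerate(vocab)}
-- ===== Notes on version B (the rewrite author's own statement) =====
-- stated objective: alternative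
-- what changed: Replaces set-dedup followed by a batch sort with an online insertion algorithm: each normalized token is binary-searched into a strictly sorted duplicate-free vocabulary list as the sentences are read, so no set is built and no sort call is made.
import Mathlib
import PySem

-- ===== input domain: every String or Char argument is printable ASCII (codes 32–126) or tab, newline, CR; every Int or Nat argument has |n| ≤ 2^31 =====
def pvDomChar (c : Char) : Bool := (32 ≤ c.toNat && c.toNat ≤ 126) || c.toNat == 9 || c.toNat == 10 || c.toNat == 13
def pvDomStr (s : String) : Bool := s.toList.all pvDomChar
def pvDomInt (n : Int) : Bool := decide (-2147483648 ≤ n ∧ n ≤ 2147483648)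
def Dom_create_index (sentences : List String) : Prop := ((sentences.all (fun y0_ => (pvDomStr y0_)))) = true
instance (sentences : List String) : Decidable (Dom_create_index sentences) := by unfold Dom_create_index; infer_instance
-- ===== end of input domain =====

-- B maintains a strictly sorted duplicate-free vocabulary by online insertion while scanning; no set and no sort call (alternative decomposition, return value only).

-- ===== PORT A =====
def create_index (sentences : List String) : List (String × Int) :=
  let vocab : PySem.Set String := sentences.foldl (fun v sent =>
    (PySem.Str.split₀ sent).foldl (fun v token =>
      let token := String.ofList (token.toList.filter PySem.Chars.isalnum)
      if token ≠ "" then PySem.Set.add v (PySem.Str.lower token) else v) v) PySem.Set.empty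
  ((PySem.List.enumerate (PySem.List.sorted vocab (fun x => x) false) 0).foldl
    (fun d p => d.insert p.2 (p.1 + 1)) PySem.Dict.empty).items

-- ===== PORT B =====
-- the 'while lo < hi: mid = (lo + hi) // 2; ...' binary-search loop of Source B
-- (lo, hi are nonnegative Python ints; // 2 on nonnegatives is Nat division)
def pvBis (vs : List String) (w : String) (lo hi : Nat) : Nat :=
  if _h : lo < hi then
    let mid := (lo + hi) / 2
    if vs.getD mid "" < w then pvBis vs w (mid + 1) hi else pvBis vs w lo mid
  else lo
termination_by hi - lo
decreasing_by all_goals omega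

def create_index_alt (sentences : List String) : List (String × Int) :=
  let vocab : List String := sentences.foldl (fun vs sent =>
    (PySem.Str.split₀ sent).foldl (fun vs token =>
      let token := String.ofList (token.toList.filter PySem.Chars.isalnum)
      if token ≠ "" then
        let w := PySem.Str.lower token
        let i := pvBis vs w 0 vs.length
        if i = vs.length ∨ vs.getD i "" ≠ w then PySem.List.insert vs (i : Int) w else vs
      else vs) vs) []
  ((PySem.List.enumerate vocab 0).foldl
    (fun d p => d.insert p.2 (p.1 + 1)) PySem.Dict.empty).items

-- ===== PRECONDITION & SPEC =====
def Spec_create_index (sentences : List String) (out : List (String × Int)) : Prop := out = create_index_alt sentences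
instance (sentences : List String) (out : List (String × Int)) : Decidable (Spec_create_index sentences out) := by unfold Spec_create_index; infer_instance

-- ===== CLAIM (what is proved, stated in full; the proofs are below) =====
def Claim_equal_create_index : Prop := ∀ (sentences : List String), Dom_create_index sentences → Spec_create_index sentences (create_index sentences)

-- ===== LEMMAS AND PROOFS =====

-- flat list of normalized lowercased words of a token list / of the sentence list
def pvWordsT : List String → List String
  | [] => []
  | t :: ts =>
    (let n := String.ofList (t.toList.filter PySem.Chars.isalnum)
     if n ≠ "" then [PySem.Str.lower n] else []) ++ pvWordsT ts

def pvWordsS : List String → List String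
  | [] => []
  | s :: ss => pvWordsT (PySem.Str.split₀ s) ++ pvWordsS ss

-- proof-only: the first index whose element is not < w (what the binary search lands on)
def pvScanIdx (vs : List String) (w : String) : Nat :=
  match vs with
  | [] => 0
  | v :: rest => if v < w then pvScanIdx rest w + 1 else 0

-- recursive characterization of B's search-and-insert step
def pvSIns : List String → String → List String
  | [], w => [w]
  | v :: vs, w => if v < w then v :: pvSIns vs w else if v ≠ w then w :: v :: vs else v :: vs

theorem pv_flatT {σ : Type} (f : σ → String → σ) (tokens : List String) (s : σ) :
    tokens.foldl (fun s token =>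
      let t := String.ofList (token.toList.filter PySem.Chars.isalnum)
      if t ≠ "" then f s (PySem.Str.lower t) else s) s
    = (pvWordsT tokens).foldl f s := by
  induction tokens generalizing s with
  | nil => rfl
  | cons t ts ih =>
    simp only [List.foldl_cons, pvWordsT, List.foldl_append]
    split_ifs with h <;> simp only [List.foldl_cons, List.foldl_nil] <;> exact ih _

theorem pv_flat {σ : Type} (f : σ → String → σ) (sentences : List String) (s : σ) :
    sentences.foldl (fun s sent =>
      (PySem.Str.split₀ sent).foldl (fun s token =>
        let t := String.ofList (token.toList.filter PySem.Chars.isalnum)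
        if t ≠ "" then f s (PySem.Str.lower t) else s) s) s
    = (pvWordsS sentences).foldl f s := by
  induction sentences generalizing s with
  | nil => rfl
  | cons sen ss ih =>
    simp only [List.foldl_cons, pvWordsS, List.foldl_append]
    rw [pv_flatT]; exact ih _

theorem pv_scanIdx_le (vs : List String) (w : String) : pvScanIdx vs w ≤ vs.length := by
  induction vs with
  | nil => simp [pvScanIdx]
  | cons v vs ih =>
    rw [pvScanIdx]
    split_ifs
    · simpa using ih
    · simp

theorem pv_insert_natCast {α : Type} (xs : List α) (n : Nat) (v : α) (h : n ≤ xs.length) :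
    PySem.List.insert xs (n : Int) v = xs.take n ++ v :: xs.drop n := by
  have hk : (PySem.List.sliceIndices xs.length (some (n : Int)) none 1).1 = (n : Int) := by
    simp [PySem.List.sliceIndices]
    omega
  simp [PySem.List.insert, hk]

theorem pv_ins_eq_sIns (vs : List String) (w : String) :
    (let i := pvScanIdx vs w;
     if i = vs.length ∨ vs.getD i "" ≠ w then PySem.List.insert vs (i : Int) w else vs)
    = pvSIns vs w := by
  induction vs with
  | nil => simp only [pvScanIdx, pvSIns]; rfl
  | cons v vs ih =>
    simp only [pvScanIdx, pvSIns]
    by_cases hlt : v < w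
    · rw [if_pos hlt, if_pos hlt]
      have hle := pv_scanIdx_le vs w
      have hcond : (pvScanIdx vs w + 1 = (v :: vs).length ∨ (v :: vs).getD (pvScanIdx vs w + 1) "" ≠ w)
          ↔ (pvScanIdx vs w = vs.length ∨ vs.getD (pvScanIdx vs w) "" ≠ w) := by
        simp [List.length_cons]
      rw [← ih]
      simp only []
      by_cases hc : pvScanIdx vs w = vs.length ∨ vs.getD (pvScanIdx vs w) "" ≠ w
      · rw [if_pos (hcond.mpr hc), if_pos hc]
        rw [pv_insert_natCast _ _ _ (by simpa using Nat.succ_le_succ hle),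
            pv_insert_natCast _ _ _ hle]
        simp
      · rw [if_neg (fun hx => hc (hcond.mp hx)), if_neg hc]
    · rw [if_neg hlt, if_neg hlt]
      by_cases hv : v ≠ w
      · rw [if_pos (Or.inr (by simpa using hv)), if_pos hv]
        rw [pv_insert_natCast _ 0 _ (by simp)]
        simp
      · rw [not_not] at hv
        subst hv
        simp

theorem pv_mem_sIns (vs : List String) (w x : String) :
    x ∈ pvSIns vs w ↔ x = w ∨ x ∈ vs := by
  induction vs with
  | nil => simp [pvSIns]
  | cons v vs ih =>
    rw [pvSIns]
    split_ifs with h1 h2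
    · simp only [List.mem_cons, ih]; tauto
    · simp only [List.mem_cons]
    · rw [not_not] at h2; subst h2; simp only [List.mem_cons]; tauto

theorem pv_pairwise_sIns (vs : List String) (w : String) (hs : vs.Pairwise (· < ·)) :
    (pvSIns vs w).Pairwise (· < ·) := by
  induction vs with
  | nil => simp [pvSIns]
  | cons v vs ih =>
    rcases List.pairwise_cons.mp hs with ⟨hv, hs'⟩
    rw [pvSIns]
    split_ifs with h1 h2
    · refine List.pairwise_cons.mpr ⟨?_, ih hs'⟩
      intro y hy
      rcases (pv_mem_sIns vs w y).mp hy with rfl | hy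
      · exact h1
      · exact hv y hy
    · have hwv : w < v := lt_of_le_of_ne (not_lt.mp h1) (Ne.symm h2)
      refine List.pairwise_cons.mpr ⟨?_, hs⟩
      intro y hy
      rcases List.mem_cons.mp hy with rfl | hy
      · exact hwv
      · exact lt_trans hwv (hv y hy)
    · exact hs

theorem pv_foldl_sIns (ws : List String) (vs : List String) (hs : vs.Pairwise (· < ·)) :
    (ws.foldl pvSIns vs).Pairwise (· < ·) ∧
    (∀ x, x ∈ ws.foldl pvSIns vs ↔ x ∈ vs ∨ x ∈ ws) := by
  induction ws generalizing vs with
  | nil => exact ⟨hs, fun x => by simp⟩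
  | cons w ws ih =>
    simp only [List.foldl_cons]
    rcases ih (pvSIns vs w) (pv_pairwise_sIns vs w hs) with ⟨h1, h2⟩
    refine ⟨h1, fun x => ?_⟩
    rw [h2 x, pv_mem_sIns]
    simp; tauto

theorem pv_scanIdx_eq_of (w : String) :
    ∀ (vs : List String) (lo : Nat), lo ≤ vs.length →
      (∀ i, i < lo → vs.getD i "" < w) →
      (∀ i, lo ≤ i → i < vs.length → ¬ vs.getD i "" < w) →
      pvScanIdx vs w = lo := by
  intro vs
  induction vs with
  | nil =>
    intro lo hle _ _
    have : lo = 0 := by simpa using hle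
    subst this; rfl
  | cons v rest ih =>
    intro lo hle h1 h2
    match lo with
    | 0 =>
      have := h2 0 (Nat.le_refl 0) (by simp)
      simp only [List.getD_cons_zero] at this
      simp [pvScanIdx, this]
    | m + 1 =>
      have hv : v < w := by simpa using h1 0 (Nat.succ_pos m)
      rw [pvScanIdx, if_pos hv]
      rw [ih m (by simpa using hle)
        (fun i hi => by simpa using h1 (i + 1) (by omega))
        (fun i hi hlen => by simpa using h2 (i + 1) (by omega) (by simpa using hlen))]

theorem pv_getD_mono (vs : List String) (hs : vs.Pairwise (· ≤ ·)) (i j : Nat)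
    (hij : i ≤ j) (hj : j < vs.length) : vs.getD i "" ≤ vs.getD j "" := by
  rcases Nat.lt_or_ge i j with h | h
  · rw [List.getD_eq_getElem vs "" (by omega), List.getD_eq_getElem vs "" hj]
    exact List.pairwise_iff_getElem.mp hs i j (by omega) hj h
  · have : i = j := by omega
    subst this; exact le_refl _

theorem pv_bis_eq (vs : List String) (w : String) (hs : vs.Pairwise (· ≤ ·)) :
    ∀ (n lo hi : Nat), hi - lo = n → lo ≤ hi → hi ≤ vs.length →
      (∀ i, i < lo → vs.getD i "" < w) →
      (∀ i, hi ≤ i → i < vs.length → ¬ vs.getD i "" < w) →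
      pvBis vs w lo hi = pvScanIdx vs w := by
  intro n
  induction n using Nat.strong_induction_on with
  | _ n ih =>
    intro lo hi hn hlh hhi h1 h2
    rw [pvBis]
    split_ifs with hlt
    · by_cases hm : vs.getD ((lo + hi) / 2) "" < w
      · rw [if_pos hm]
        refine ih (hi - ((lo + hi) / 2 + 1)) (by omega) _ _ rfl (by omega) hhi ?_ h2
        intro i hi'
        exact lt_of_le_of_lt (pv_getD_mono vs hs i ((lo + hi) / 2) (by omega) (by omega)) hm
      · rw [if_neg hm]
        refine ih ((lo + hi) / 2 - lo) (by omega) _ _ rfl (by omega) (by omega) h1 ?_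
        intro i hi' hlen hc
        exact hm (lt_of_le_of_lt (pv_getD_mono vs hs ((lo + hi) / 2) i hi' hlen) hc)
    · have : lo = hi := by omega
      subst this
      exact (pv_scanIdx_eq_of w vs lo (by omega) h1 h2).symm

theorem pv_stepB_eq (vs : List String) (w : String) (hs : vs.Pairwise (· < ·)) :
    (let i := pvBis vs w 0 vs.length;
     if i = vs.length ∨ vs.getD i "" ≠ w then PySem.List.insert vs (i : Int) w else vs)
    = pvSIns vs w := by
  have hfull : pvBis vs w 0 vs.length = pvScanIdx vs w :=
    pv_bis_eq vs w (hs.imp le_of_lt) vs.length 0 vs.length (by omega) (by omega) (le_refl _)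
      (fun i hi => absurd hi (Nat.not_lt_zero i)) (fun i hi hlen => absurd hlen (by omega))
  show (if pvBis vs w 0 vs.length = vs.length ∨ vs.getD (pvBis vs w 0 vs.length) "" ≠ w
        then PySem.List.insert vs ((pvBis vs w 0 vs.length : Nat) : Int) w else vs) = pvSIns vs w
  rw [hfull]
  exact pv_ins_eq_sIns vs w

theorem pv_foldl_stepB (ws : List String) (vs : List String) (hs : vs.Pairwise (· < ·)) :
    ws.foldl (fun vs w =>
      let i := pvBis vs w 0 vs.length;
      if i = vs.length ∨ vs.getD i "" ≠ w then PySem.List.insert vs (i : Int) w else vs) vs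
    = ws.foldl pvSIns vs := by
  induction ws generalizing vs with
  | nil => rfl
  | cons w ws ih =>
    simp only [List.foldl_cons]
    rw [pv_stepB_eq vs w hs]
    exact ih _ (pv_pairwise_sIns vs w hs)

theorem create_index_eq (sentences : List String) :
    create_index sentences = create_index_alt sentences := by
  unfold create_index create_index_alt
  have hA : sentences.foldl (fun v sent =>
      (PySem.Str.split₀ sent).foldl (fun v token =>
        let token := String.ofList (token.toList.filter PySem.Chars.isalnum)
        if token ≠ "" then PySem.Set.add v (PySem.Str.lower token) else v) v) PySem.Set.empty
      = PySem.Set.ofList (pvWordsS sentences) := by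
    rw [PySem.Set.ofList_eq_foldl]
    exact pv_flat PySem.Set.add sentences PySem.Set.empty
  have hB : sentences.foldl (fun vs sent =>
      (PySem.Str.split₀ sent).foldl (fun vs token =>
        let token := String.ofList (token.toList.filter PySem.Chars.isalnum)
        if token ≠ "" then
          let w := PySem.Str.lower token
          let i := pvBis vs w 0 vs.length
          if i = vs.length ∨ vs.getD i "" ≠ w then PySem.List.insert vs (i : Int) w else vs
        else vs) vs) ([] : List String)
      = (pvWordsS sentences).foldl pvSIns [] := by
    rw [pv_flat (fun vs w =>
      let i := pvBis vs w 0 vs.length;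
      if i = vs.length ∨ vs.getD i "" ≠ w then PySem.List.insert vs (i : Int) w else vs)
      sentences []]
    exact pv_foldl_stepB (pvWordsS sentences) [] (by simp)
  simp only [hA, hB]
  rcases pv_foldl_sIns (pvWordsS sentences) [] (by simp) with ⟨hpw, hmem⟩
  have hsorted : PySem.List.sorted (PySem.Set.ofList (pvWordsS sentences)) (fun x => x) false
      = (pvWordsS sentences).foldl pvSIns [] := by
    apply PySem.List.sorted_eq_of_perm_of_pairwise_lt
    · rw [List.perm_ext_iff_of_nodup (hpw.imp ne_of_lt) (PySem.Set.nodup_ofList _)]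
      intro a
      rw [hmem a, PySem.Set.mem_ofList]
      simp
    · exact hpw
  rw [hsorted]

-- ===== VERDICT (by name: the statement is the Claim_ definition above) =====
theorem create_index_spec : Claim_equal_create_index := by
  intro sentences _
  unfold Spec_create_index
  exact create_index_eq sentences
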